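-- pv_equiv track=rewrite | github.com/Dev-Ian-Lee/algorithm | programmers/level2/17683.py | solution
-- ===== SOURCE A (Python) =====
-- def solution(m, musicinfos):
--     answer = []
--     num = 1
--
--     # "#" 포함하는 음은 소문자로 대체
--     if "#" in m:
--         m = m.replace("C#", "c").replace("D#", "d").replace("F#", "f").replace("G#", "g").replace("A#", "a")
--
--     for info in musicinfos:
--         start, end, title, notes = info.split(",")
--         runtime = 0
--         total = ""
--
--         if "#" in notes:
--             notes = notes.replace("C#", "c").replace("D#", "d").replace("F#", "f").replace("G#", "g").replace("A#", "a")
--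
--         # 재생시간 계산
--         start_time = int(start[:2]) * 60 + int(start[3:])
--         end_time = int(end[:2]) * 60 + int(end[3:])
--         runtime = end_time - start_time
--
--         # 재생시간이 음악 길이보다 긴 경우, 반복 재생
--         if runtime > len(notes):
--             div, mod = divmod(runtime, len(notes))
--             total = (notes * div) + notes[:mod]
--
--         # 재생시간이 음악 길이보다 작은 경우, 일부만 재생
--         elif runtime < len(notes):
--             total = notes[:runtime]
--
--         else:
--             total = notes[:]
--
--         if m in total:
--             answer.append([runtime, num, title])
--             num += 1
--
--     if len(answer) == 0:
--         return "(None)"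
--
--     elif len(answer) == 1:
--         return answer[0][2]
--
--     # 조건이 일치하는 음악이 여러 개일 경우, 재생 시간이 긴 순서대로, 먼저 입력된 순서대로 정렬
--     else:
--         answer.sort(key = lambda x : (-x[0], x[1]))
--         return answer[0][2]
-- ===== SOURCE B (Python) =====
-- def solution(m, musicinfos):
--     def norm(s):
--         return s.replace("C#", "c").replace("D#", "d").replace("F#", "f").replace("G#", "g").replace("A#", "a")
--
--     def runtime_of(start, end):
--         return int(end[:2]) * 60 + int(end[3:]) - int(start[:2]) * 60 - int(start[3:])
--
--     def played_of(notes, runtime):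
--         n = len(notes)
--         if runtime > n:
--             return notes * (runtime // n) + notes[:runtime % n]
--         return notes[:runtime]
--
--     key = norm(m)
--     best_runtime = None
--     best_title = None
--     for info in musicinfos:
--         start, end, title, notes = info.split(",")
--         notes = norm(notes)
--         runtime = runtime_of(start, end)
--         played = played_of(notes, runtime)
--         if key in played and (best_runtime is None or runtime > best_runtime):
--             best_runtime = runtime
--             best_title = title
--     return best_title if best_title is not None else "(None)"
-- ===== Notes on version B (the rewrite author's own statement) =====
-- stated objective: simpler
-- what changed: Replaces A's collect-into-a-numbered-list + final sort by (-runtime, insertion order) with a single streaming argmax (strict '>' keeps the earliest maximal runtime), drops the 'num' counter and the '#'-guards (the replacement chain is a no-op without '#'), and merges A's three played-string branches into two.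
import Mathlib
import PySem

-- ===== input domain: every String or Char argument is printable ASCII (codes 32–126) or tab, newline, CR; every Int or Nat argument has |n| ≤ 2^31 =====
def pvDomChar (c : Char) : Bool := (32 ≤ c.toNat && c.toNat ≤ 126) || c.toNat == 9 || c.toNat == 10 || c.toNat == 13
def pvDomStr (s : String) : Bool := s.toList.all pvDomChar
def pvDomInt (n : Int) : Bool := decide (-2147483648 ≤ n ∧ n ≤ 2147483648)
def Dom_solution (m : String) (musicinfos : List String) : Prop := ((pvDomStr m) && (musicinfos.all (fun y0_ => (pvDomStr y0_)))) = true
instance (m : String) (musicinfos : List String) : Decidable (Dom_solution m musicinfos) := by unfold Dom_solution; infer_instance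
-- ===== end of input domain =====

-- B replaces A's collect-into-a-numbered-list + final sort by (-runtime, input order) with a single
-- streaming argmax (strict '>' keeps the earliest maximal runtime); equality of the return value is
-- proved on Pre_ (the inputs where the Python A returns instead of raising).

-- ===== PORT A =====
-- A's loop body, named for the fold (a literal transcription of the for-body;
-- totalA below is A's if/elif/else block computing `total` from `notes` and `runtime`).
def totalA (notes : String) (runtime : Int) : String :=
  if runtime > PySem.Str.len notes then
    String.ofList (PySem.List.pyRepeat notes.toList (PySem.Int.floordiv runtime (PySem.Str.len notes)) ++
      (PySem.Str.slice notes none (some (PySem.Int.mod runtime (PySem.Str.len notes)))).toList)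
  else if runtime < PySem.Str.len notes then
    PySem.Str.slice notes none (some runtime)
  else
    PySem.Str.slice notes none none

def stepA (mkey : String) (st : List (Int × Int × String) × Int) (info : String) :
    List (Int × Int × String) × Int :=
  match (PySem.Str.split? info ",").getD [] with
  | [start, end_, title, notes] =>
    let notes := if PySem.Str.isIn "#" notes then
        PySem.Str.replace (PySem.Str.replace (PySem.Str.replace (PySem.Str.replace
          (PySem.Str.replace notes "C#" "c") "D#" "d") "F#" "f") "G#" "g") "A#" "a"
      else notes
    let start_time := (PySem.Int.ofStr? (PySem.Str.slice start none (some 2))).getD 0 * 60 +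
        (PySem.Int.ofStr? (PySem.Str.slice start (some 3) none)).getD 0
    let end_time := (PySem.Int.ofStr? (PySem.Str.slice end_ none (some 2))).getD 0 * 60 +
        (PySem.Int.ofStr? (PySem.Str.slice end_ (some 3) none)).getD 0
    let runtime := end_time - start_time
    let total := totalA notes runtime
    if PySem.Str.isIn mkey total then (st.1 ++ [(runtime, st.2, title)], st.2 + 1) else st
  | _ => st

def solution (m : String) (musicinfos : List String) : String :=
  let m := if PySem.Str.isIn "#" m then
      PySem.Str.replace (PySem.Str.replace (PySem.Str.replace (PySem.Str.replace
        (PySem.Str.replace m "C#" "c") "D#" "d") "F#" "f") "G#" "g") "A#" "a"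
    else m
  let res := musicinfos.foldl (stepA m) ([], 1)
  let answer := res.1
  if answer.length = 0 then "(None)"
  else if answer.length = 1 then (PySem.List.pyGetD answer 0 (0, 1, "")).2.2
  else (PySem.List.pyGetD
    (PySem.List.sorted2 answer (fun x => -x.1) (fun x => x.2.1)) 0 (0, 1, "")).2.2

-- ===== PORT B =====
-- Source B's helpers norm, runtime_of and played_of
def normB (s : String) : String :=
  PySem.Str.replace (PySem.Str.replace (PySem.Str.replace (PySem.Str.replace
    (PySem.Str.replace s "C#" "c") "D#" "d") "F#" "f") "G#" "g") "A#" "a"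

def runtimeB (start end_ : String) : Int :=
  (PySem.Int.ofStr? (PySem.Str.slice end_ none (some 2))).getD 0 * 60 +
  (PySem.Int.ofStr? (PySem.Str.slice end_ (some 3) none)).getD 0 -
  (PySem.Int.ofStr? (PySem.Str.slice start none (some 2))).getD 0 * 60 -
  (PySem.Int.ofStr? (PySem.Str.slice start (some 3) none)).getD 0

def playedB (notes : String) (runtime : Int) : String :=
  let n := PySem.Str.len notes
  if runtime > n then
    String.ofList (PySem.List.pyRepeat notes.toList (PySem.Int.floordiv runtime n) ++
      (PySem.Str.slice notes none (some (PySem.Int.mod runtime n))).toList)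
  else PySem.Str.slice notes none (some runtime)

-- Source B's loop body, named for the fold (state = (best_runtime, best_title))
def stepB (key : String) (st : Option Int × Option String) (info : String) :
    Option Int × Option String :=
  match (PySem.Str.split? info ",").getD [] with
  | [start, end_, title, notes] =>
    let notes := normB notes
    let runtime := runtimeB start end_
    let played := playedB notes runtime
    if PySem.Str.isIn key played &&
        (match st.1 with | none => true | some br => decide (br < runtime)) then
      (some runtime, some title)
    else st
  | _ => st

def solution_alt (m : String) (musicinfos : List String) : String :=
  let key := normB m
  let res := musicinfos.foldl (stepB key) (none, none)
  match res.2 with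
  | some t => t
  | none => "(None)"

-- ===== PRECONDITION & SPEC =====
-- Pre_ excludes exactly the inputs where the Python A raises: an info line that does not split on ','
-- into exactly 4 fields (unpack ValueError), hh/mm substrings that int() rejects (ValueError), and a
-- positive runtime with an empty (replaced) note string (ZeroDivisionError in divmod).
-- (The equivalence proof itself does not consult Pre_ — the two ports agree even on the total
-- extensions of those raising inputs — but Pre_ delimits where the Pythons return at all.)
def okInfo (info : String) : Bool :=
  match (PySem.Str.split? info ",").getD [] with
  | [start, end_, _, notes] =>
    (PySem.Int.ofStr? (PySem.Str.slice start none (some 2))).isSome &&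
    (PySem.Int.ofStr? (PySem.Str.slice start (some 3) none)).isSome &&
    (PySem.Int.ofStr? (PySem.Str.slice end_ none (some 2))).isSome &&
    (PySem.Int.ofStr? (PySem.Str.slice end_ (some 3) none)).isSome &&
    (PySem.Str.len (normB notes) != 0 || decide (runtimeB start end_ ≤ 0))
  | _ => false

def Pre_solution (m : String) (musicinfos : List String) : Prop :=
  musicinfos.all okInfo = true

instance (m : String) (musicinfos : List String) : Decidable (Pre_solution m musicinfos) := by
  unfold Pre_solution; infer_instance

def pvWitness_solution : String × List String :=
  ("ABC", ["12:00,12:14,HELLO,C#BCDEFAB", "13:00,13:05,WORLD,ABCDEF"])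

def Spec_solution (m : String) (musicinfos : List String) (out : String) : Prop :=
  out = solution_alt m musicinfos
instance (m : String) (musicinfos : List String) (out : String) : Decidable (Spec_solution m musicinfos out) := by
  unfold Spec_solution; infer_instance

-- ===== CLAIM (what is proved, stated in full; the proofs are below) =====
def Claim_equal_solution : Prop := ∀ (m : String) (musicinfos : List String),
  Dom_solution m musicinfos → Pre_solution m musicinfos →
  Spec_solution m musicinfos (solution m musicinfos)

-- ===== LEMMAS AND PROOFS =====

-- str.replace is the identity when the pattern does not occur
theorem replace_go_no_occ (old new : List Char) :
    ∀ (fuel : Nat) (l acc : List Char), ¬ old <:+: l →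
      PySem.Chars.replace.go old new fuel l acc = acc.reverse ++ l := by
  intro fuel
  induction fuel with
  | zero => intro l acc h; simp [PySem.Chars.replace.go]
  | succ n ih =>
    intro l acc h
    cases l with
    | nil => simp [PySem.Chars.replace.go]
    | cons c t =>
      rw [PySem.Chars.replace.go]
      have hp : old.isPrefixOf (c :: t) = false := by
        by_contra hx
        exact h ((List.isPrefixOf_iff_prefix.mp (by simpa using hx)).isInfix)
      rw [hp]
      simp only [Bool.false_eq_true, if_false]
      rw [ih t (c :: acc) (fun hx => h (hx.trans (List.suffix_cons c t).isInfix))]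
      simp

theorem replace_no_occ (s old new : List Char) (hold : old ≠ []) (h : ¬ old <:+: s) :
    PySem.Chars.replace s old new = s := by
  unfold PySem.Chars.replace
  rw [if_neg (by simpa [List.isEmpty_iff] using hold)]
  rw [replace_go_no_occ old new s.length s [] h]
  simp

theorem str_replace_no_occ (s old new : String) (hold : old.toList ≠ [])
    (h : ¬ old.toList <:+: s.toList) : PySem.Str.replace s old new = s := by
  rw [PySem.Str.replace, replace_no_occ _ _ _ hold h, String.ofList_toList]

theorem norm_no_hash (s : String) (h : ¬ '#' ∈ s.toList) : normB s = s := by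
  have key : ∀ (o : String) (n : String), o.toList ≠ [] → '#' ∈ o.toList →
      PySem.Str.replace s o n = s := by
    intro o n ho hm
    exact str_replace_no_occ s o n ho (fun hx => h (hx.sublist.subset hm))
  unfold normB
  rw [key "C#" "c" (by decide) (by decide)]
  rw [key "D#" "d" (by decide) (by decide)]
  rw [key "F#" "f" (by decide) (by decide)]
  rw [key "G#" "g" (by decide) (by decide)]
  rw [key "A#" "a" (by decide) (by decide)]

theorem no_hash_of_isIn_false (s : String) (h : PySem.Str.isIn "#" s = false) :
    ¬ '#' ∈ s.toList := by
  intro hm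
  have hx : PySem.Str.isIn "#" s = true := by
    rw [PySem.Str.isIn_iff_infix]
    obtain ⟨l1, l2, he⟩ := List.mem_iff_append.mp hm
    exact ⟨l1, l2, by simp [he]⟩
  rw [h] at hx; exact Bool.false_ne_true hx

-- A's three-way played-string branch is B's two-way one
theorem slice_full (s : String) :
    PySem.Str.slice s none (some (PySem.Str.len s)) = PySem.Str.slice s none none := by
  have h : (PySem.Str.slice s none (some (PySem.Str.len s))).toList =
      (PySem.Str.slice s none none).toList := by
    simp [PySem.Str.toList_slice]
  calc PySem.Str.slice s none (some (PySem.Str.len s))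
      = String.ofList (PySem.Str.slice s none (some (PySem.Str.len s))).toList := (String.ofList_toList).symm
    _ = String.ofList (PySem.Str.slice s none none).toList := by rw [h]
    _ = PySem.Str.slice s none none := String.ofList_toList
theorem totalA_eq_playedB (notes : String) (runtime : Int) :
    totalA notes runtime = playedB notes runtime := by
  simp only [totalA, playedB]
  split_ifs with h1 h2
  · rfl
  · rfl
  · have he : runtime = PySem.Str.len notes := le_antisymm (not_lt.mp h1) (not_lt.mp h2)
    rw [he]
    exact (slice_full notes).symm
-- the per-info result (runtime, title) when the melody matches, shared by both loop analyses
def pInfo (key : String) (info : String) : Option (Int × String) :=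
  match (PySem.Str.split? info ",").getD [] with
  | [start, end_, title, notes] =>
    if PySem.Str.isIn key (playedB (normB notes) (runtimeB start end_)) then
      some (runtimeB start end_, title)
    else none
  | _ => none

theorem runtimeA_eq (start end_ : String) :
    (PySem.Int.ofStr? (PySem.Str.slice end_ none (some 2))).getD 0 * 60 +
      (PySem.Int.ofStr? (PySem.Str.slice end_ (some 3) none)).getD 0 -
      ((PySem.Int.ofStr? (PySem.Str.slice start none (some 2))).getD 0 * 60 +
       (PySem.Int.ofStr? (PySem.Str.slice start (some 3) none)).getD 0) =
    runtimeB start end_ := by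
  unfold runtimeB; ring

theorem stepA_eq (key : String) (st : List (Int × Int × String) × Int) (info : String) :
    stepA key st info = match pInfo key info with
      | some (r, t) => (st.1 ++ [(r, st.2, t)], st.2 + 1)
      | none => st := by
  unfold stepA pInfo
  cases hl : (PySem.Str.split? info ",").getD [] with
  | nil => rfl
  | cons a l1 =>
    cases l1 with
    | nil => rfl
    | cons b l2 =>
      cases l2 with
      | nil => rfl
      | cons c l3 =>
        cases l3 with
        | nil => rfl
        | cons d l4 =>
          cases l4 with
          | cons e l5 => rfl
          | nil =>
            have hn : (if PySem.Str.isIn "#" d = true then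
                PySem.Str.replace (PySem.Str.replace (PySem.Str.replace (PySem.Str.replace
                  (PySem.Str.replace d "C#" "c") "D#" "d") "F#" "f") "G#" "g") "A#" "a"
              else d) = normB d := by
              by_cases h : PySem.Str.isIn "#" d = true
              · rw [if_pos h]; rfl
              · rw [if_neg h]
                exact (norm_no_hash d (no_hash_of_isIn_false d (by
                  simpa using h))).symm
            simp only [hn, runtimeA_eq, totalA_eq_playedB]
            cases hq : PySem.Str.isIn key (playedB (normB d) (runtimeB a b)) <;> simp

theorem stepB_eq (key : String) (st : Option Int × Option String) (info : String) :
    stepB key st info = match pInfo key info with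
      | some (r, t) =>
        if (match st.1 with | none => true | some br => decide (br < r)) then (some r, some t) else st
      | none => st := by
  unfold stepB pInfo
  cases hl : (PySem.Str.split? info ",").getD [] with
  | nil => rfl
  | cons a l1 =>
    cases l1 with
    | nil => rfl
    | cons b l2 =>
      cases l2 with
      | nil => rfl
      | cons c l3 =>
        cases l3 with
        | nil => rfl
        | cons d l4 =>
          cases l4 with
          | cons e l5 => rfl
          | nil =>
            cases hq : PySem.Str.isIn key (playedB (normB d) (runtimeB a b))
            · simp only [hq, Bool.false_and, Bool.false_eq_true, if_false]
            · simp only [hq, Bool.true_and]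
              rfl
-- numbering of A's matched entries
def numberFrom : Int → List (Int × String) → List (Int × Int × String)
  | _, [] => []
  | k, (r, t) :: ys => (r, k, t) :: numberFrom (k + 1) ys

theorem numberFrom_length : ∀ (ys : List (Int × String)) (k : Int),
    (numberFrom k ys).length = ys.length := by
  intro ys
  induction ys with
  | nil => intro k; rfl
  | cons p ys ih => obtain ⟨r, t⟩ := p; intro k; simp [numberFrom, ih]

theorem loopA (key : String) (infos : List String) :
    ∀ (ans : List (Int × Int × String)) (num : Int),
      infos.foldl (stepA key) (ans, num) =
        (ans ++ numberFrom num (infos.filterMap (pInfo key)),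
         num + ((infos.filterMap (pInfo key)).length : Int)) := by
  induction infos with
  | nil => intro ans num; simp [numberFrom]
  | cons i rest ih =>
    intro ans num
    simp only [List.foldl_cons, List.filterMap_cons]
    rw [stepA_eq]
    cases hp : pInfo key i with
    | none => simpa using ih ans num
    | some p =>
      obtain ⟨r, t⟩ := p
      simp only
      rw [ih (ans ++ [(r, num, t)]) (num + 1)]
      simp only [numberFrom, List.append_assoc, List.singleton_append, List.length_cons,
        Prod.mk.injEq]
      exact ⟨trivial, by push_cast; ring⟩
-- B's streaming argmax, abstracted over the matched entries
def upd (b : Option (Int × String)) (x : Int × String) : Option (Int × String) :=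
  match b with
  | none => some x
  | some p => if p.1 < x.1 then some x else b

theorem stepB_upd (r : Int) (t : String) (o : Option (Int × String)) :
    (if (match (o.map (·.1) : Option Int) with
          | none => true
          | some br => decide (br < r)) = true then
        ((some r : Option Int), (some t : Option String))
      else (o.map (·.1), o.map (·.2))) =
      ((upd o (r, t)).map (·.1), (upd o (r, t)).map (·.2)) := by
  cases o with
  | none => rfl
  | some q =>
    simp only [upd, Option.map_some]
    by_cases hbr : q.1 < r
    · rw [if_pos (by simpa using hbr), if_pos hbr]; rfl
    · rw [if_neg (by simpa using hbr), if_neg hbr]; rfl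

theorem loopB (key : String) (infos : List String) :
    ∀ (o : Option (Int × String)),
      infos.foldl (stepB key) (o.map (·.1), o.map (·.2)) =
        (((infos.filterMap (pInfo key)).foldl upd o).map (·.1),
         ((infos.filterMap (pInfo key)).foldl upd o).map (·.2)) := by
  induction infos with
  | nil => intro o; rfl
  | cons i rest ih =>
    intro o
    simp only [List.foldl_cons, List.filterMap_cons]
    rw [stepB_eq]
    cases hp : pInfo key i with
    | none => exact ih o
    | some p =>
      obtain ⟨r, t⟩ := p
      simp only
      rw [stepB_upd r t o, ih (upd o (r, t))]
      rfl
-- the same argmax over the numbered entries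
def updN (b : Option (Int × Int × String)) (x : Int × Int × String) : Option (Int × Int × String) :=
  match b with
  | none => some x
  | some p => if p.1 < x.1 then some x else b

def strip (x : Int × Int × String) : Int × String := (x.1, x.2.2)

theorem strip_fold : ∀ (ys : List (Int × String)) (k : Int) (b : Option (Int × Int × String)),
    ys.foldl upd (b.map strip) = ((numberFrom k ys).foldl updN b).map strip := by
  intro ys
  induction ys with
  | nil => intro k b; rfl
  | cons p ys ih =>
    obtain ⟨r, t⟩ := p
    intro k b
    simp only [numberFrom, List.foldl_cons]
    have h : upd (b.map strip) (r, t) = (updN b (r, k, t)).map strip := by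
      cases b with
      | none => rfl
      | some q =>
        simp only [upd, updN, Option.map_some, strip]
        split_ifs <;> rfl
    rw [h, ih (k + 1) (updN b (r, k, t))]

theorem mem_numberFrom_num : ∀ (ys : List (Int × String)) (k : Int) (x : Int × Int × String),
    x ∈ numberFrom k ys → k ≤ x.2.1 := by
  intro ys
  induction ys with
  | nil => intro k x hx; simp [numberFrom] at hx
  | cons p ys ih =>
    obtain ⟨r, t⟩ := p
    intro k x hx
    simp only [numberFrom, List.mem_cons] at hx
    rcases hx with rfl | hx
    · simp
    · have := ih (k + 1) x hx; omega

theorem numberFrom_pairwise : ∀ (ys : List (Int × String)) (k : Int),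
    (numberFrom k ys).Pairwise (fun a b => a.2.1 < b.2.1) := by
  intro ys
  induction ys with
  | nil => intro k; simp [numberFrom]
  | cons p ys ih =>
    obtain ⟨r, t⟩ := p
    intro k
    simp only [numberFrom, List.pairwise_cons]
    refine ⟨fun x hx => ?_, ih (k + 1)⟩
    have := mem_numberFrom_num ys (k + 1) x hx
    simp only at *
    omega

-- the streaming argmax yields the unique entry that is strictly lex-minimal for (-runtime, num)
theorem argmax_spec : ∀ (l : List (Int × Int × String)) (z : Int × Int × String),
    (z :: l).Pairwise (fun a b => a.2.1 < b.2.1) →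
    ∃ b, l.foldl updN (some z) = some b ∧ b ∈ z :: l ∧
      ∀ y ∈ z :: l, y ≠ b → (y.1 < b.1 ∨ (y.1 = b.1 ∧ b.2.1 < y.2.1)) := by
  intro l
  induction l with
  | nil =>
    intro z _
    refine ⟨z, rfl, by simp, ?_⟩
    intro y hy hne
    simp only [List.mem_singleton] at hy
    exact absurd hy hne
  | cons x l ih =>
    intro z hpw
    rw [List.pairwise_cons] at hpw
    obtain ⟨hz, hpwx⟩ := hpw
    have hzx : z.2.1 < x.2.1 := hz x List.mem_cons_self
    have hxl : ∀ y ∈ l, x.2.1 < y.2.1 := (List.pairwise_cons.mp hpwx).1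
    have hpwl : l.Pairwise (fun a b => a.2.1 < b.2.1) := (List.pairwise_cons.mp hpwx).2
    have hfold : (x :: l).foldl updN (some z) = l.foldl updN (updN (some z) x) := rfl
    by_cases hlt : z.1 < x.1
    · -- the new element wins
      have hupd : updN (some z) x = some x := by simp [updN, hlt]
      obtain ⟨b, hb, hmem, hmin⟩ := ih x hpwx
      refine ⟨b, by rw [hfold, hupd]; exact hb, ?_, ?_⟩
      · exact List.mem_cons_of_mem z hmem
      · intro y hy hne
        rcases List.mem_cons.mp hy with rfl | hy'
        · -- y = z : b.1 ≥ x.1 > z.1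
          have hxb : x.1 ≤ b.1 := by
            by_cases hbx : b = x
            · rw [hbx]
            · rcases hmin x List.mem_cons_self (fun h => hbx h.symm) with h | h
              · omega
              · omega
          left; omega
        · exact hmin y hy' hne
    · -- the old best is kept
      have hupd : updN (some z) x = some z := by simp [updN, hlt]
      have hpw' : (z :: l).Pairwise (fun a b => a.2.1 < b.2.1) :=
        List.pairwise_cons.mpr ⟨fun y hy => hz y (List.mem_cons_of_mem x hy), hpwl⟩
      obtain ⟨b, hb, hmem, hmin⟩ := ih z hpw'
      refine ⟨b, by rw [hfold, hupd]; exact hb, ?_, ?_⟩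
      · rcases List.mem_cons.mp hmem with h | h
        · exact h ▸ List.mem_cons_self
        · exact List.mem_cons_of_mem z (List.mem_cons_of_mem x h)
      · intro y hy hne
        rcases List.mem_cons.mp hy with rfl | hy'
        · exact hmin y List.mem_cons_self hne
        rcases List.mem_cons.mp hy' with rfl | hy''
        · -- y = x, and x did not beat z
          have hzb : z.1 ≤ b.1 := by
            by_cases hbz : b = z
            · rw [hbz]
            · rcases hmin z List.mem_cons_self (fun h => hbz h.symm) with h | h
              · omega
              · omega
          by_cases hxb : y.1 < b.1
          · left; exact hxb
          · have hyb : y.1 = b.1 := by omega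
            have hbz : b = z := by
              by_contra hbz
              have hbl : b ∈ l := by
                rcases List.mem_cons.mp hmem with h | h
                · exact absurd h hbz
                · exact h
              have h1 : z.2.1 < b.2.1 := hz b (List.mem_cons_of_mem y hbl)
              rcases hmin z List.mem_cons_self (fun h => hbz h.symm) with h | h
              · omega
              · omega
            right
            refine ⟨hyb, ?_⟩
            rw [hbz]
            exact hzx
        · exact hmin y (List.mem_cons_of_mem z hy'') hne
theorem lex_lt_of (p q : Int × Int) (h : p.1 < q.1 ∨ (p.1 = q.1 ∧ p.2 < q.2)) :
    toLex p < toLex q := by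
  rw [Prod.Lex.lt_iff]; simpa using h

-- Python's tuple-keyed sort is the lex-keyed sort
theorem sorted2_eq (xs : List (Int × Int × String)) :
    PySem.List.sorted2 xs (fun x => -x.1) (fun x => x.2.1) =
      PySem.List.sorted xs (fun x => toLex (-x.1, x.2.1)) := by
  unfold PySem.List.sorted2 PySem.List.sorted
  simp only [Bool.false_eq_true, if_false]
  have hfun : (fun (a b : Int × Int × String) =>
      decide (-a.1 < -b.1) || (!decide (-b.1 < -a.1) && decide (a.2.1 < b.2.1))) =
      (fun (a b : Int × Int × String) => decide (toLex (-a.1, a.2.1) < toLex (-b.1, b.2.1))) := by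
    funext a b
    rw [Bool.eq_iff_iff]
    simp only [Bool.or_eq_true, Bool.and_eq_true, Bool.not_eq_eq_eq_not, Bool.not_true,
      decide_eq_true_eq, decide_eq_false_iff_not, Prod.Lex.lt_iff, ofLex_toLex]
    omega
  rw [hfun]
-- A's postlude applied to the numbered matches = B's postlude applied to the argmax
theorem finish (ys : List (Int × String)) :
    (if (numberFrom 1 ys).length = 0 then "(None)"
     else if (numberFrom 1 ys).length = 1 then
       (PySem.List.pyGetD (numberFrom 1 ys) 0 (0, 1, "")).2.2
     else (PySem.List.pyGetD
       (PySem.List.sorted2 (numberFrom 1 ys) (fun x => -x.1) (fun x => x.2.1)) 0 (0, 1, "")).2.2) =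
      (match (ys.foldl upd none).map (·.2) with
       | some t => t
       | none => "(None)") := by
  cases ys with
  | nil => rfl
  | cons p ys' =>
    obtain ⟨r, t⟩ := p
    have hpw : ((r, 1, t) :: numberFrom 2 ys').Pairwise (fun a b => a.2.1 < b.2.1) := by
      have := numberFrom_pairwise ((r, t) :: ys') 1
      simpa [numberFrom] using this
    obtain ⟨b, hb, hmem, hmin⟩ := argmax_spec (numberFrom 2 ys') (r, 1, t) hpw
    have hfold : ((r, t) :: ys').foldl upd none = some (strip b) := by
      have h1 : ((r, t) :: ys').foldl upd none = ys'.foldl upd (some (r, t)) := rfl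
      have h2 : (some ((r, 1, t) : Int × Int × String)).map strip = some ((r, t) : Int × String) := rfl
      rw [h1, ← h2, strip_fold ys' 2 (some (r, 1, t)), hb]
      rfl
    rw [hfold]
    have hansdef : numberFrom 1 ((r, t) :: ys') = (r, 1, t) :: numberFrom 2 ys' := by
      simp [numberFrom]
    rw [hansdef]
    cases ys' with
    | nil =>
      have hbz : b = (r, 1, t) := by simpa [numberFrom] using hb.symm
      simp [numberFrom, hbz, PySem.List.pyGetD_zero, strip]
    | cons q ys'' =>
      have hlen : ((r, 1, t) :: numberFrom 2 (q :: ys'')).length = ys''.length + 2 := by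
        simp [numberFrom_length]
      rw [if_neg (by omega), if_neg (by omega)]
      rw [sorted2_eq]
      set ans := (r, 1, t) :: numberFrom 2 (q :: ys'') with hans
      cases hs : PySem.List.sorted ans (fun x => toLex (-x.1, x.2.1)) with
      | nil =>
        exact absurd ((PySem.List.sorted_eq_nil_iff ans _ false).mp hs) (by simp [hans])
      | cons zz tl =>
        have hzmem : zz ∈ ans :=
          (PySem.List.sorted_perm ans (fun x => toLex (-x.1, x.2.1)) false).subset
            (hs ▸ List.mem_cons_self)
        have hle := PySem.List.key_head_sorted_le ans (fun x => toLex (-x.1, x.2.1)) hs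
        have hzb : zz = b := by
          by_contra hne
          have hPlt : (toLex ((-b.1 : Int), b.2.1)) < toLex ((-zz.1 : Int), zz.2.1) := by
            rcases hmin zz hzmem hne with h | h
            · exact lex_lt_of _ _ (Or.inl (by simpa using h))
            · exact lex_lt_of _ _ (Or.inr ⟨by simpa using h.1.symm, h.2⟩)
          exact absurd hPlt (not_lt.mpr (hle b hmem))
        rw [PySem.List.pyGetD_zero]
        simp [hzb, strip]
-- ===== VERDICT (by name: the statement is the Claim_ definition above) =====
theorem solution_spec : Claim_equal_solution := by
  intro m infos _ _
  unfold Spec_solution solution solution_alt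
  have hm : (if PySem.Str.isIn "#" m = true then
      PySem.Str.replace (PySem.Str.replace (PySem.Str.replace (PySem.Str.replace
        (PySem.Str.replace m "C#" "c") "D#" "d") "F#" "f") "G#" "g") "A#" "a"
    else m) = normB m := by
    by_cases h : PySem.Str.isIn "#" m = true
    · rw [if_pos h]; rfl
    · rw [if_neg h]
      exact (norm_no_hash m (no_hash_of_isIn_false m (by simpa using h))).symm
  simp only [hm]
  rw [loopA (normB m) infos [] 1]
  have h0 : ((none, none) : Option Int × Option String) =
      ((none : Option (Int × String)).map (·.1), (none : Option (Int × String)).map (·.2)) := rfl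
  rw [h0, loopB (normB m) infos none]
  simp only [List.nil_append]
  exact finish (infos.filterMap (pInfo (normB m)))
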